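-- pv_equiv track=rewrite | github.com/yashbrown21/AdventOfCode | 2025/Day10/day10.py | min_config_buttons
-- ===== SOURCE A (Python) =====
-- from itertools import combinations
-- from collections import Counter
--
-- def check_tuple_list(target, button_combi):
--     button_moves = [i for sub in button_combi for i in sub]
--     button_counts = Counter(button_moves)
--     actual_lights_on = tuple(sorted(set([i for i in button_moves if button_counts[i] % 2 != 0])))
--
--     if actual_lights_on == target:
--         return True
--     else:
--         return False
--
-- def min_config_buttons(target, buttons):
--     for i in range(1, len(buttons) + 1):
--         combis = combinations(buttons, i)
--
--         if any([check_tuple_list(target, combi) for combi in combis]):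
--             return i
--         else:
--             continue
--
--     return i
-- ===== SOURCE B (Python) =====
-- # Same result as A, but via dynamic programming over XOR-states instead of
-- # enumerating all button combinations size by size: each button is reduced to
-- # its set of odd-count lights (a sorted tuple), and a dict maps each reachable
-- # symmetric-difference state to the minimum number of buttons producing it.
-- def min_config_buttons(target, buttons):
--     n = len(buttons)
--     # only a strictly increasing tuple of distinct lights can ever be matched
--     if tuple(sorted(set(target))) != tuple(target):
--         return n
--     tgt = tuple(target)
--
--     def parity(button):
--         return tuple(sorted(set([x for x in button if button.count(x) % 2 != 0])))
--
--     def symdiff(s, t):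
--         return tuple(sorted([x for x in s if x not in t] + [y for y in t if y not in s]))
--
--     states = {}  # state (sorted tuple) -> min size of a non-empty subset reaching it
--     for b in buttons:
--         p = parity(b)
--         new = dict(states)
--         for s, c in states.items():
--             t = symdiff(s, p)
--             if t not in new or c + 1 < new[t]:
--                 new[t] = c + 1
--         if p not in new or 1 < new[p]:
--             new[p] = 1
--         states = new
--     return states[tgt] if tgt in states else n
-- ===== Notes on version B (the rewrite author's own statement) =====
-- stated objective: faster
-- what changed: A tests every k-combination of buttons for k = 1..n (re-flattening and re-counting each one); B makes one pass over the buttons, reducing each to its odd-count light set and growing a dict from each reachable symmetric-difference state to the minimum number of buttons producing it, then looks the target up once.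
import Mathlib
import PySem

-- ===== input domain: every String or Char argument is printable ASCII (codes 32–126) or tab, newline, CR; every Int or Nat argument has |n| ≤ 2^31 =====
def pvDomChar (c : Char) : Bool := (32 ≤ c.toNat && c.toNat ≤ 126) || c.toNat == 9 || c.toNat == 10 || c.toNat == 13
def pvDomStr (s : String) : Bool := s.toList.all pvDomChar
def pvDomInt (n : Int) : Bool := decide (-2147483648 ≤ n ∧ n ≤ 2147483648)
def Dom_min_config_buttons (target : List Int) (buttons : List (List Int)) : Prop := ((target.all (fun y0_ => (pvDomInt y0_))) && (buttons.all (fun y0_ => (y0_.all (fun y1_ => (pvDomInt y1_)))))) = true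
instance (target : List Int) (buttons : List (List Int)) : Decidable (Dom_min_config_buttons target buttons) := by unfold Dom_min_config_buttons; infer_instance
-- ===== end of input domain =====

-- B replaces A's size-by-size scan over all button combinations by a single left-to-right
-- dynamic programming pass over XOR-states (each state = set of lights toggled an odd number
-- of times), keeping for every reachable state the minimum number of buttons producing it.

-- ===== PORT A =====
-- check_tuple_list: Counter ports to PySem.Dict.counter; tuple(sorted(set(...))) == target
-- is an element-wise comparison of two integer tuples, i.e. list equality.
def check_tuple_list (target : List Int) (button_combi : List (List Int)) : Bool :=
  let button_moves := button_combi.flatMap (fun sub => sub)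
  let button_counts := PySem.Dict.counter button_moves
  let actual_lights_on := PySem.List.sorted
    (PySem.Set.ofList (button_moves.filter
      (fun i => decide (PySem.Int.mod (button_counts.getD i 0) 2 ≠ 0)))) (fun x => x)
  if actual_lights_on = target then true else false

-- the 'for i in range(1, len(buttons)+1)' loop; the accumulator is the current value of i.
-- itertools.combinations ports to PySem.List.combinations (i ≥ 1 for every element of the range).
def minConfigLoopA (target : List Int) (buttons : List (List Int)) : List Int → Int → Int
  | [], i => i
  | i :: rest, _ =>
    let combis := PySem.List.combinations buttons i.toNat
    if (combis.map (fun combi => check_tuple_list target combi)).any (fun b => b) then i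
    else minConfigLoopA target buttons rest i

def min_config_buttons (target : List Int) (buttons : List (List Int)) : Int :=
  -- the initial accumulator 0 is only read when the range is empty, i.e. buttons = [],
  -- where Python raises UnboundLocalError (excluded by Pre_).
  minConfigLoopA target buttons (PySem.List.pyRange 1 (PySem.List.len buttons + 1)) 0

-- ===== PORT B =====
-- parity(button) = tuple(sorted(set([x for x in button if button.count(x) % 2 != 0])))
def pvParity (button : List Int) : List Int :=
  PySem.List.sorted
    (PySem.Set.ofList (button.filter
      (fun x => decide (PySem.Int.mod ((PySem.List.count button x : Nat) : Int) 2 ≠ 0)))) (fun x => x)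

-- symdiff(s, t) = tuple(sorted([x for x in s if x not in t] + [y for y in t if y not in s]))
def pvSymdiff (s t : List Int) : List Int :=
  PySem.List.sorted
    (s.filter (fun x => decide (x ∉ t)) ++ t.filter (fun y => decide (y ∉ s))) (fun x => x)

-- 'if k not in d or v < d[k]: d[k] = v'
def pvInsertMin (d : PySem.Dict (List Int) Int) (k : List Int) (v : Int) : PySem.Dict (List Int) Int :=
  if !(d.contains k) then d.insert k v
  else if v < d.getD k 0 then d.insert k v
  else d

-- one iteration of the outer 'for b in buttons' loop of Source B
def pvStep (states : PySem.Dict (List Int) Int) (b : List Int) : PySem.Dict (List Int) Int :=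
  let p := pvParity b
  let new := states.items.foldl (fun nw sc => pvInsertMin nw (pvSymdiff sc.1 p) (sc.2 + 1)) states
  pvInsertMin new p 1

def min_config_buttons_alt (target : List Int) (buttons : List (List Int)) : Int :=
  let n := PySem.List.len buttons
  if PySem.List.sorted (PySem.Set.ofList target) (fun x => x) ≠ target then n
  else
    let states := buttons.foldl pvStep PySem.Dict.empty
    match states.get? target with
    | some c => c
    | none => n

-- ===== PRECONDITION & SPEC =====
-- Pre_ excludes only buttons = []: there range(1, len(buttons)+1) is empty, the loop never
-- runs, and A's final 'return i' raises UnboundLocalError (no value is returned).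
def Pre_min_config_buttons (target : List Int) (buttons : List (List Int)) : Prop :=
  buttons ≠ []
instance (target : List Int) (buttons : List (List Int)) : Decidable (Pre_min_config_buttons target buttons) := by unfold Pre_min_config_buttons; infer_instance

def pvWitness_min_config_buttons : List Int × List (List Int) := ([1], [[1], [2]])

def Spec_min_config_buttons (target : List Int) (buttons : List (List Int)) (out : Int) : Prop := out = min_config_buttons_alt target buttons
instance (target : List Int) (buttons : List (List Int)) (out : Int) : Decidable (Spec_min_config_buttons target buttons out) := by unfold Spec_min_config_buttons; infer_instance

-- ===== CLAIM (what is proved, stated in full; the proofs are below) =====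
def Claim_equal_min_config_buttons : Prop := ∀ (target : List Int) (buttons : List (List Int)), Dom_min_config_buttons target buttons → Pre_min_config_buttons target buttons → Spec_min_config_buttons target buttons (min_config_buttons target buttons)


-- ===== LEMMAS AND PROOFS =====

-- ---- generalities about sorted-without-key integer lists ----

theorem pv_sorted_mem (xs : List Int) (a : Int) :
    a ∈ PySem.List.sorted xs (fun x => x) ↔ a ∈ xs :=
  (PySem.List.sorted_perm xs (fun x => x) false).mem_iff

theorem pv_sorted_pairwise_lt (xs : List Int) (h : xs.Nodup) :
    List.Pairwise (· < ·) (PySem.List.sorted xs (fun x => x)) := by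
  have hle := PySem.List.sorted_pairwise xs (fun x => x)
  have hnd : (PySem.List.sorted xs (fun x => x)).Nodup :=
    ((PySem.List.sorted_perm xs (fun x => x) false).nodup_iff).2 h
  exact (hle.and hnd).imp (fun h => lt_of_le_of_ne h.1 h.2)

theorem pv_canon_ext (s t : List Int)
    (hs : List.Pairwise (· < ·) s) (ht : List.Pairwise (· < ·) t)
    (h : ∀ x, x ∈ s ↔ x ∈ t) : s = t := by
  have hns : s.Nodup := hs.imp ne_of_lt
  have hnt : t.Nodup := ht.imp ne_of_lt
  have hperm : s.Perm t := (List.perm_ext_iff_of_nodup hns hnt).2 h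
  exact List.Perm.eq_of_pairwise (fun a b _ _ hab hba => le_antisymm hab hba)
    (hs.imp le_of_lt) (ht.imp le_of_lt) hperm

theorem pv_sorted_eq_self (s : List Int) (hs : List.Pairwise (· < ·) s) :
    PySem.List.sorted (PySem.Set.ofList s) (fun x => x) = s := by
  rw [PySem.Set.ofList_eq_self_of_nodup s (hs.imp ne_of_lt)]
  exact PySem.List.sorted_eq_of_perm_of_pairwise_lt s s (fun x => x) (List.Perm.refl s) hs

-- ---- parity / symdiff semantics ----

theorem pvParity_mem (l : List Int) (x : Int) :
    x ∈ pvParity l ↔ List.count x l % 2 = 1 := by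
  unfold pvParity
  rw [pv_sorted_mem, PySem.Set.mem_ofList, List.mem_filter]
  simp only [PySem.List.count, decide_eq_true_eq,
    PySem.Int.mod_eq_emod_of_pos (by norm_num : (0:Int) < 2)]
  constructor
  · rintro ⟨-, h⟩
    omega
  · intro h
    refine ⟨List.count_pos_iff.1 (by omega), by omega⟩

theorem pvParity_pairwise (l : List Int) : List.Pairwise (· < ·) (pvParity l) :=
  pv_sorted_pairwise_lt _ (PySem.Set.nodup_ofList _)

theorem pvSymdiff_mem (s t : List Int) (x : Int) :
    x ∈ pvSymdiff s t ↔ ((x ∈ s) ↔ ¬ (x ∈ t)) := by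
  unfold pvSymdiff
  rw [pv_sorted_mem, List.mem_append, List.mem_filter, List.mem_filter]
  simp only [decide_eq_true_eq]
  tauto

theorem pvSymdiff_pairwise (s t : List Int) (hs : s.Nodup) (ht : t.Nodup) :
    List.Pairwise (· < ·) (pvSymdiff s t) := by
  unfold pvSymdiff
  refine pv_sorted_pairwise_lt _ (List.Nodup.append (hs.filter _) (ht.filter _) ?_)
  intro a ha hb
  have h1 := (List.mem_filter.1 ha).2
  have h2 := (List.mem_filter.1 hb).1
  simp only [decide_eq_true_eq] at h1
  exact h1 h2

theorem pvParity_append (u v : List Int) :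
    pvParity (u ++ v) = pvSymdiff (pvParity u) (pvParity v) := by
  refine pv_canon_ext _ _ (pvParity_pairwise _)
    (pvSymdiff_pairwise _ _ ((pvParity_pairwise u).imp ne_of_lt)
      ((pvParity_pairwise v).imp ne_of_lt)) (fun x => ?_)
  rw [pvParity_mem, pvSymdiff_mem, pvParity_mem, pvParity_mem, List.count_append]
  constructor
  · intro h; constructor <;> intro h2 <;> omega
  · intro h
    by_cases h1 : List.count x u % 2 = 1
    · have := h.1 h1; omega
    · by_cases h2 : List.count x v % 2 = 1
      · omega
      · have := h.2; omega

theorem pvSymdiff_nil_left (p : List Int) (hp : List.Pairwise (· < ·) p) :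
    pvSymdiff [] p = p := by
  unfold pvSymdiff
  simp only [List.filter_nil, List.not_mem_nil, not_false_eq_true, decide_true,
    List.filter_true, List.nil_append]
  exact PySem.List.sorted_eq_of_perm_of_pairwise_lt p p (fun x => x) (List.Perm.refl p) hp

-- the XOR-state of a subset of buttons
def pvX (t : List (List Int)) : List Int := pvParity t.flatten

theorem pvX_pairwise (t : List (List Int)) : List.Pairwise (· < ·) (pvX t) :=
  pvParity_pairwise _

theorem pvX_concat (t : List (List Int)) (b : List Int) :
    pvX (t ++ [b]) = pvSymdiff (pvX t) (pvParity b) := by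
  unfold pvX
  rw [List.flatten_append]
  simp only [List.flatten_cons, List.flatten_nil, List.append_nil]
  exact pvParity_append _ _

-- ---- A's check is 'the XOR-state of the combination equals target' ----

theorem checkA_iff (target : List Int) (c : List (List Int)) :
    check_tuple_list target c = true ↔ pvX c = target := by
  unfold check_tuple_list pvX pvParity
  simp only [PySem.Dict.getD_counter, List.flatMap_id', PySem.List.count]
  split <;> simp_all

-- ---- option-valued running minimum ----

def pvOmin (o : Option Int) (v : Int) : Int :=
  match o with
  | none => v
  | some w => min w v

def pvMinI (l : List Int) : Option Int :=
  l.foldl (fun o v => some (pvOmin o v)) none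

def pvMerge (a b : Option Int) : Option Int :=
  match a, b with
  | none, b => b
  | a, none => a
  | some a, some b => some (min a b)

theorem pvMerge_none_right (a : Option Int) : pvMerge a none = a := by
  cases a <;> rfl

theorem pvMerge_omin (o X : Option Int) (v : Int) :
    pvMerge (some (pvOmin o v)) X = pvMerge o (pvMerge (some v) X) := by
  cases o <;> cases X <;> simp [pvOmin, pvMerge, min_assoc]

theorem pvMerge_assoc (a b c : Option Int) :
    pvMerge (pvMerge a b) c = pvMerge a (pvMerge b c) := by
  cases a <;> cases b <;> cases c <;> simp [pvMerge, min_assoc]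

theorem pvOmin_eq_merge (o : Option Int) (v : Int) :
    some (pvOmin o v) = pvMerge o (some v) := by
  cases o <;> rfl

theorem pvMinI_master (l : List Int) (o : Option Int) :
    l.foldl (fun o v => some (pvOmin o v)) o = pvMerge o (pvMinI l) := by
  induction l generalizing o with
  | nil => simp [pvMinI, pvMerge_none_right]
  | cons v l ih =>
    have hl : pvMinI (v :: l) = pvMerge (some v) (pvMinI l) := by
      show l.foldl _ (some (pvOmin none v)) = _
      rw [ih]; rfl
    rw [List.foldl_cons, ih, hl, pvMerge_omin]

theorem pvMinI_cons (v : Int) (l : List Int) :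
    pvMinI (v :: l) = pvMerge (some v) (pvMinI l) := by
  show l.foldl _ (some (pvOmin none v)) = _
  rw [pvMinI_master]; rfl

theorem pvMinI_append (l₁ l₂ : List Int) :
    pvMinI (l₁ ++ l₂) = pvMerge (pvMinI l₁) (pvMinI l₂) := by
  unfold pvMinI
  rw [List.foldl_append, pvMinI_master]
  rfl

theorem pvMinI_eq_none_iff (l : List Int) : pvMinI l = none ↔ l = [] := by
  cases l with
  | nil => simp [pvMinI]
  | cons v l =>
    rw [pvMinI_cons]
    cases pvMinI l <;> simp [pvMerge]

theorem pvMinI_eq_some_iff (l : List Int) (m : Int) :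
    pvMinI l = some m ↔ m ∈ l ∧ ∀ x ∈ l, m ≤ x := by
  induction l generalizing m with
  | nil => simp [pvMinI]
  | cons v l ih =>
    rw [pvMinI_cons]
    cases h : pvMinI l with
    | none =>
      rw [pvMinI_eq_none_iff] at h; subst h
      have hmerge : pvMerge (some v) none = some v := rfl
      rw [hmerge, Option.some.injEq]
      constructor
      · rintro rfl
        exact ⟨List.mem_singleton_self v, fun x hx => le_of_eq (List.mem_singleton.1 hx).symm⟩
      · rintro ⟨h1, -⟩
        exact (List.mem_singleton.1 h1).symm
    | some w =>
      obtain ⟨hwmem, hwlb⟩ := (ih w).1 h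
      have hmerge : pvMerge (some v) (some w) = some (min v w) := rfl
      rw [hmerge, Option.some.injEq]
      constructor
      · rintro rfl
        constructor
        · rcases le_total v w with hvw | hvw
          · rw [min_eq_left hvw]; exact List.mem_cons_self ..
          · rw [min_eq_right hvw]; exact List.mem_cons_of_mem _ hwmem
        · intro x hx
          rcases List.mem_cons.1 hx with rfl | hx
          · exact min_le_left _ _
          · exact le_trans (min_le_right _ _) (hwlb x hx)
      · rintro ⟨h1, h2⟩
        have hmv : m ≤ v := h2 v (List.mem_cons_self ..)
        have hmw : m ≤ w := h2 w (List.mem_cons_of_mem _ hwmem)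
        have hge : min v w ≤ m := by
          rcases List.mem_cons.1 h1 with rfl | h1
          · exact min_le_left _ _
          · exact le_trans (min_le_right _ _) (hwlb m h1)
        rcases le_total v w with hvw | hvw
        · rw [min_eq_left hvw] at hge ⊢; omega
        · rw [min_eq_right hvw] at hge ⊢; omega

theorem pvMinI_eq_of_dominates (l₁ l₂ : List Int)
    (h₁ : ∀ v ∈ l₁, ∃ w ∈ l₂, w ≤ v) (h₂ : ∀ w ∈ l₂, ∃ v ∈ l₁, v ≤ w) :
    pvMinI l₁ = pvMinI l₂ := by
  cases hA : pvMinI l₁ with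
  | none =>
    rw [pvMinI_eq_none_iff] at hA; subst hA
    cases hB : pvMinI l₂ with
    | none => rfl
    | some m =>
      obtain ⟨hm, -⟩ := (pvMinI_eq_some_iff _ _).1 hB
      obtain ⟨v, hv, -⟩ := h₂ m hm
      exact absurd hv (List.not_mem_nil)
  | some m₁ =>
    obtain ⟨hm₁, hlb₁⟩ := (pvMinI_eq_some_iff _ _).1 hA
    cases hB : pvMinI l₂ with
    | none =>
      rw [pvMinI_eq_none_iff] at hB; subst hB
      obtain ⟨w, hw, -⟩ := h₁ m₁ hm₁
      exact absurd hw (List.not_mem_nil)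
    | some m₂ =>
      obtain ⟨hm₂, hlb₂⟩ := (pvMinI_eq_some_iff _ _).1 hB
      obtain ⟨w, hw, hwle⟩ := h₁ m₁ hm₁
      obtain ⟨v, hv, hvle⟩ := h₂ m₂ hm₂
      have := hlb₂ w hw
      have := hlb₁ v hv
      congr 1
      omega

-- ---- the DP invariant ----

def pvMinSz (bs : List (List Int)) (s : List Int) : Option Int :=
  pvMinI ((bs.sublists.filter (fun t => !t.isEmpty && decide (pvX t = s))).map
    (fun t => (t.length : Int)))

def pvInv (bs : List (List Int)) (d : PySem.Dict (List Int) Int) : Prop :=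
  d.keys.Nodup ∧ ∀ s, d.get? s = pvMinSz bs s

theorem pvInsertMin_get? (d : PySem.Dict (List Int) Int) (k : List Int) (v : Int) (s : List Int) :
    (pvInsertMin d k v).get? s = if s = k then some (pvOmin (d.get? k) v) else d.get? s := by
  have hcont := PySem.Dict.contains_eq_isSome_get? d k
  unfold pvInsertMin
  cases hg : d.get? k with
  | none =>
    rw [hg] at hcont
    simp only [hcont, Option.isSome_none, Bool.not_false, if_true]
    rw [PySem.Dict.get?_insert]
    simp [pvOmin]
  | some w =>
    rw [hg] at hcont
    have h1 : (!d.contains k) = false := by rw [hcont]; rfl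
    rw [h1, if_neg Bool.false_ne_true]
    have hgd : d.getD k 0 = w := by rw [PySem.Dict.getD_eq_get?_getD, hg]; rfl
    rw [hgd]
    by_cases hv : v < w
    · rw [if_pos hv, PySem.Dict.get?_insert]
      simp [pvOmin, min_eq_right (le_of_lt hv)]
    · rw [if_neg hv]
      split
      · next hsk => subst hsk; rw [hg]; simp [pvOmin, min_eq_left (not_lt.1 hv)]
      · rfl

theorem pvInsertMin_nodup (d : PySem.Dict (List Int) Int) (k : List Int) (v : Int)
    (h : d.keys.Nodup) : (pvInsertMin d k v).keys.Nodup := by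
  unfold pvInsertMin
  split
  · exact PySem.Dict.nodup_keys_insert d k v h
  · split
    · exact PySem.Dict.nodup_keys_insert d k v h
    · exact h

theorem pv_foldl_insertMin_nodup (l : List (List Int × Int)) (p : List Int)
    (d : PySem.Dict (List Int) Int) (h : d.keys.Nodup) :
    (l.foldl (fun nw sc => pvInsertMin nw (pvSymdiff sc.1 p) (sc.2 + 1)) d).keys.Nodup := by
  induction l generalizing d with
  | nil => exact h
  | cons sc l ih => exact ih _ (pvInsertMin_nodup _ _ _ h)

theorem pv_foldl_insertMin_get? (l : List (List Int × Int)) (p : List Int)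
    (d : PySem.Dict (List Int) Int) (s : List Int) :
    (l.foldl (fun nw sc => pvInsertMin nw (pvSymdiff sc.1 p) (sc.2 + 1)) d).get? s
    = l.foldl (fun o sc => if s = pvSymdiff sc.1 p then some (pvOmin o (sc.2 + 1)) else o)
        (d.get? s) := by
  induction l generalizing d with
  | nil => rfl
  | cons sc l ih =>
    rw [List.foldl_cons, List.foldl_cons, ih]
    congr 1
    rw [pvInsertMin_get?]
    split
    · next hsk => subst hsk; rfl
    · rfl

theorem pv_foldl_omin_filter (l : List (List Int × Int)) (p : List Int) (s : List Int)
    (o : Option Int) :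
    l.foldl (fun o sc => if s = pvSymdiff sc.1 p then some (pvOmin o (sc.2 + 1)) else o) o
    = pvMerge o (pvMinI ((l.filter (fun sc => decide (pvSymdiff sc.1 p = s))).map
        (fun sc => sc.2 + 1))) := by
  induction l generalizing o with
  | nil => simp [pvMinI, pvMerge_none_right]
  | cons sc l ih =>
    rw [List.foldl_cons, ih, List.filter_cons]
    by_cases hc : pvSymdiff sc.1 p = s
    · rw [if_pos hc.symm]
      simp only [hc, decide_true, if_true, List.map_cons, pvMinI_cons]
      rw [pvMerge_omin]
    · rw [if_neg (fun h => hc h.symm)]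
      simp only [hc, decide_false, Bool.false_eq_true, if_false]

theorem pvX_nil : pvX [] = [] := rfl

theorem pvStep_eq (d : PySem.Dict (List Int) Int) (b : List Int) :
    pvStep d b = pvInsertMin
      (d.items.foldl (fun nw sc => pvInsertMin nw (pvSymdiff sc.1 (pvParity b)) (sc.2 + 1)) d)
      (pvParity b) 1 := rfl

theorem pvMinSz_concat (bs : List (List Int)) (b : List Int) (s : List Int) :
    pvMinSz (bs ++ [b]) s
    = pvMerge (pvMinSz bs s)
        (pvMinI ((bs.sublists.filter
          (fun t => decide (pvSymdiff (pvX t) (pvParity b) = s))).map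
            (fun t => (t.length : Int) + 1))) := by
  unfold pvMinSz
  rw [List.sublists_concat, List.filter_append, List.map_append, pvMinI_append]
  congr 1
  rw [List.filter_map, List.map_map]
  rw [List.filter_congr (q := fun t => decide (pvSymdiff (pvX t) (pvParity b) = s))
    (by intro t _; simp [Function.comp, pvX_concat])]
  refine congrArg pvMinI (List.map_congr_left ?_)
  intro t _
  simp [Function.comp]

theorem pv_key (bs : List (List Int)) (b : List Int) (d : PySem.Dict (List Int) Int)
    (s : List Int) (hnd : d.keys.Nodup) (hget : ∀ q, d.get? q = pvMinSz bs q) :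
    pvMinI ((bs.sublists.filter
        (fun t => decide (pvSymdiff (pvX t) (pvParity b) = s))).map
          (fun t => (t.length : Int) + 1))
    = pvMerge (pvMinI ((d.items.filter
        (fun sc => decide (pvSymdiff sc.1 (pvParity b) = s))).map (fun sc => sc.2 + 1)))
        (if s = pvParity b then some 1 else none) := by
  have hp : List.Pairwise (· < ·) (pvParity b) := pvParity_pairwise b
  have hR : pvMerge (pvMinI ((d.items.filter
        (fun sc => decide (pvSymdiff sc.1 (pvParity b) = s))).map (fun sc => sc.2 + 1)))
        (if s = pvParity b then some 1 else none)
      = pvMinI (((d.items.filter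
        (fun sc => decide (pvSymdiff sc.1 (pvParity b) = s))).map (fun sc => sc.2 + 1))
          ++ (if s = pvParity b then [1] else [])) := by
    rw [pvMinI_append]
    congr 1
    split <;> rfl
  rw [hR]
  apply pvMinI_eq_of_dominates
  · -- every combination size has a dict candidate at most as small
    intro v hv
    obtain ⟨t, htf, rfl⟩ := List.mem_map.1 hv
    obtain ⟨ht1, ht2⟩ := List.mem_filter.1 htf
    rw [decide_eq_true_eq] at ht2
    by_cases hte : t = []
    · subst hte
      rw [pvX_nil, pvSymdiff_nil_left _ hp] at ht2
      refine ⟨1, List.mem_append_right _ ?_, by simp⟩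
      rw [if_pos ht2.symm]
      exact List.mem_singleton_self 1
    · -- t nonempty: the dict has an entry for its state, with a value ≤ |t|
      have hmem : ((t.length : Int)) ∈ ((bs.sublists.filter
          (fun u => !u.isEmpty && decide (pvX u = pvX t))).map (fun u => (u.length : Int))) := by
        refine List.mem_map.2 ⟨t, List.mem_filter.2 ⟨ht1, ?_⟩, rfl⟩
        simp [hte]
      cases hmi : pvMinSz bs (pvX t) with
      | none =>
        rw [pvMinSz, pvMinI_eq_none_iff] at hmi
        rw [hmi] at hmem
        exact absurd hmem (List.not_mem_nil)
      | some c =>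
        obtain ⟨-, hlb⟩ := (pvMinI_eq_some_iff _ _).1 hmi
        have hc : c ≤ (t.length : Int) := hlb _ hmem
        have hitems : (pvX t, c) ∈ d.items :=
          PySem.Dict.mem_items_of_get?_eq_some d
            (show d.get? (pvX t) = some c by rw [hget (pvX t)]; exact hmi)
        refine ⟨c + 1, List.mem_append_left _ ?_, by omega⟩
        refine List.mem_map.2 ⟨(pvX t, c), List.mem_filter.2 ⟨hitems, ?_⟩, rfl⟩
        rw [decide_eq_true_eq]
        exact ht2
  · -- every dict candidate (and the singleton) is realised by some combination
    intro w hw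
    rcases List.mem_append.1 hw with hw | hw
    · obtain ⟨sc, hscf, rfl⟩ := List.mem_map.1 hw
      obtain ⟨hsc1, hsc2⟩ := List.mem_filter.1 hscf
      rw [decide_eq_true_eq] at hsc2
      have hsc1' : (sc.1, sc.2) ∈ d.items := by rwa [Prod.mk.eta]
      have hget1 : pvMinSz bs sc.1 = some sc.2 := by
        rw [← hget sc.1]
        exact PySem.Dict.get?_of_mem_items d hsc1' hnd
      obtain ⟨hmem, -⟩ := (pvMinI_eq_some_iff _ _).1 hget1
      obtain ⟨t, htf, htl⟩ := List.mem_map.1 hmem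
      obtain ⟨ht1, ht2⟩ := List.mem_filter.1 htf
      rw [Bool.and_eq_true, decide_eq_true_eq] at ht2
      refine ⟨(t.length : Int) + 1, List.mem_map.2 ⟨t, List.mem_filter.2 ⟨ht1, ?_⟩, rfl⟩, by omega⟩
      rw [decide_eq_true_eq, ht2.2]
      exact hsc2
    · have hsp : s = pvParity b := by
        by_contra hne
        rw [if_neg hne] at hw
        exact absurd hw (List.not_mem_nil)
      rw [if_pos hsp] at hw
      rw [List.mem_singleton.1 hw]
      refine ⟨(([] : List (List Int)).length : Int) + 1,
        List.mem_map.2 ⟨[], List.mem_filter.2 ⟨List.mem_sublists.2 (List.nil_sublist bs), ?_⟩, rfl⟩,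
        by simp⟩
      rw [decide_eq_true_eq, pvX_nil, pvSymdiff_nil_left _ hp]
      exact hsp.symm

theorem pvInv_step (bs : List (List Int)) (b : List Int) (d : PySem.Dict (List Int) Int)
    (h : pvInv bs d) : pvInv (bs ++ [b]) (pvStep d b) := by
  obtain ⟨hnd, hget⟩ := h
  constructor
  · rw [pvStep_eq]
    exact pvInsertMin_nodup _ _ _ (pv_foldl_insertMin_nodup _ _ _ hnd)
  · intro s
    rw [pvStep_eq, pvInsertMin_get?]
    simp only [pv_foldl_insertMin_get?, pv_foldl_omin_filter]
    rw [pvMinSz_concat, pv_key bs b d s hnd hget]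
    simp only [hget]
    by_cases hsp : s = pvParity b
    · subst hsp
      rw [if_pos rfl, if_pos rfl, pvOmin_eq_merge, pvMerge_assoc]
    · rw [if_neg hsp, if_neg hsp, pvMerge_none_right]

theorem pvInv_foldl (bs : List (List Int)) :
    pvInv bs (bs.foldl pvStep PySem.Dict.empty) := by
  induction bs using List.reverseRecOn with
  | nil =>
    refine ⟨PySem.Dict.nodup_keys_empty, fun s => ?_⟩
    rw [List.foldl_nil, PySem.Dict.get?_empty]
    simp [pvMinSz, pvMinI]
  | append_singleton bs b ih =>
    rw [List.foldl_append, List.foldl_cons, List.foldl_nil]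
    exact pvInv_step bs b _ ih

-- ---- assembling both sides ----

theorem pv_canonical_iff (target : List Int) :
    PySem.List.sorted (PySem.Set.ofList target) (fun x => x) = target
    ↔ List.Pairwise (· < ·) target := by
  constructor
  · intro h
    rw [← h]
    exact pv_sorted_pairwise_lt _ (PySem.Set.nodup_ofList _)
  · exact pv_sorted_eq_self target

theorem pv_loopA_eq (target : List Int) (buttons : List (List Int)) (l : List Int) (d : Int) :
    minConfigLoopA target buttons l d
    = match l.find? (fun i =>
        ((PySem.List.combinations buttons i.toNat).map
          (fun combi => check_tuple_list target combi)).any (fun b => b)) with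
      | some i => i
      | none => l.getLastD d := by
  induction l generalizing d with
  | nil => rfl
  | cons i rest ih =>
    show (if _ then _ else _) = _
    rw [List.find?_cons]
    by_cases hq : ((PySem.List.combinations buttons i.toNat).map
        (fun combi => check_tuple_list target combi)).any (fun b => b) = true
    · rw [if_pos hq, hq]
    · rw [if_neg hq, Bool.not_eq_true] at *
      rw [hq, ih i, List.getLastD_cons]

theorem pv_pyRange_map (N : Nat) :
    PySem.List.pyRange 1 ((N : Int) + 1) = (List.range N).map (fun j : Nat => ((j : Int) + 1)) := by
  induction N with
  | zero => rfl
  | succ n ih =>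
    have h1 : ((n + 1 : Nat) : Int) + 1 = ((n : Int) + 1) + 1 := by push_cast; ring
    rw [h1, PySem.List.pyRange_one_succ_right (by omega), ih, List.range_succ, List.map_append]
    simp

-- ===== VERDICT (by name: the statement is the Claim_ definition above) =====
theorem min_config_buttons_spec : Claim_equal_min_config_buttons := by
  intro target buttons _ hpre
  unfold Spec_min_config_buttons
  have hN1 : 1 ≤ buttons.length := List.length_pos_of_ne_nil hpre
  set N := buttons.length with hN
  have hlen : PySem.List.len buttons = (N : Int) := by rw [PySem.List.len_eq, hN]
  obtain ⟨hnd, hget⟩ := pvInv_foldl buttons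
  have hB : min_config_buttons_alt target buttons
      = if PySem.List.sorted (PySem.Set.ofList target) (fun x => x) ≠ target then (N : Int)
        else (match (buttons.foldl pvStep PySem.Dict.empty).get? target with
              | some c => c
              | none => (N : Int)) := by
    simp only [min_config_buttons_alt, hlen]
  unfold min_config_buttons
  rw [hlen, pv_pyRange_map, pv_loopA_eq]
  cases hmi : pvMinSz buttons target with
  | some m =>
    obtain ⟨hmem, hlb⟩ := (pvMinI_eq_some_iff _ _).1 hmi
    obtain ⟨t, htf, htl⟩ := List.mem_map.1 hmem
    obtain ⟨ht1, ht2⟩ := List.mem_filter.1 htf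
    rw [Bool.and_eq_true, decide_eq_true_eq] at ht2
    obtain ⟨hne, hXt⟩ := ht2
    have htne : t ≠ [] := by intro h; subst h; simp at hne
    have hsub : t.Sublist buttons := List.mem_sublists.1 ht1
    have hkN : t.length ≤ N := hsub.length_le
    have hk1 : 1 ≤ t.length := List.length_pos_of_ne_nil htne
    have hcanon : List.Pairwise (· < ·) target := hXt ▸ pvX_pairwise t
    have hBval : min_config_buttons_alt target buttons = m := by
      rw [hB, if_neg (not_not.2 ((pv_canonical_iff target).2 hcanon))]
      rw [hget target, hmi]
    rw [hBval]
    have htoNat : ((((t.length - 1 : Nat)) : Int) + 1).toNat = t.length := by omega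
    have hfind : (((List.range N).map (fun j : Nat => ((j : Int) + 1))).find?
        (fun i => ((PySem.List.combinations buttons i.toNat).map
          (fun combi => check_tuple_list target combi)).any (fun b => b)))
        = some (((t.length - 1 : Nat) : Int) + 1) := by
      apply List.find?_eq_some_iff_getElem.2
      refine ⟨?_, t.length - 1, by simp; omega, by simp, ?_⟩
      · rw [List.any_eq_true]
        refine ⟨check_tuple_list target t, List.mem_map.2 ⟨t, ?_, rfl⟩, (checkA_iff _ _).2 hXt⟩
        rw [htoNat, PySem.List.mem_combinations_iff]
        exact ⟨hsub, rfl⟩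
      · intro j hj
        simp only [List.getElem_map, List.getElem_range, Bool.not_eq_eq_eq_not, Bool.not_true]
        rw [Bool.eq_false_iff]
        intro hQ
        rw [List.any_eq_true] at hQ
        obtain ⟨x, hx, hxt⟩ := hQ
        obtain ⟨c, hc, rfl⟩ := List.mem_map.1 hx
        rw [PySem.List.mem_combinations_iff] at hc
        have hXc : pvX c = target := (checkA_iff _ _).1 hxt
        have hclen : c.length = (((j : Int) + 1)).toNat := hc.2
        have hcne : c ≠ [] := by
          intro h; subst h
          simp only [List.length_nil] at hclen
          omega
        have hmemc : ((c.length : Int)) ∈ ((buttons.sublists.filter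
            (fun u => !u.isEmpty && decide (pvX u = target))).map (fun u => (u.length : Int))) := by
          refine List.mem_map.2 ⟨c, List.mem_filter.2 ⟨List.mem_sublists.2 hc.1, ?_⟩, rfl⟩
          simp [hcne, hXc]
        have := hlb _ hmemc
        omega
    rw [hfind]
    show (((t.length - 1 : Nat) : Int) + 1) = m
    omega
  | none =>
    have hmi' : ((buttons.sublists.filter
        (fun u => !u.isEmpty && decide (pvX u = target))).map (fun u => (u.length : Int))) = [] := by
      rw [← pvMinI_eq_none_iff]
      exact hmi
    have hnomatch : ∀ c, c.Sublist buttons → c ≠ [] → pvX c ≠ target := by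
      intro c hcs hcne hXc
      have : ((c.length : Int)) ∈ ((buttons.sublists.filter
          (fun u => !u.isEmpty && decide (pvX u = target))).map (fun u => (u.length : Int))) := by
        refine List.mem_map.2 ⟨c, List.mem_filter.2 ⟨List.mem_sublists.2 hcs, ?_⟩, rfl⟩
        simp [hcne, hXc]
      rw [hmi'] at this
      exact absurd this (List.not_mem_nil)
    have hfind : (((List.range N).map (fun j : Nat => ((j : Int) + 1))).find?
        (fun i => ((PySem.List.combinations buttons i.toNat).map
          (fun combi => check_tuple_list target combi)).any (fun b => b)))
        = none := by
      rw [List.find?_eq_none]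
      intro x hx
      obtain ⟨j, -, rfl⟩ := List.mem_map.1 hx
      rw [Bool.not_eq_true, Bool.eq_false_iff]
      intro hQ
      rw [List.any_eq_true] at hQ
      obtain ⟨y, hy, hyt⟩ := hQ
      obtain ⟨c, hc, rfl⟩ := List.mem_map.1 hy
      rw [PySem.List.mem_combinations_iff] at hc
      have hcne : c ≠ [] := by
        intro h; subst h
        have h2 := hc.2
        simp only [List.length_nil] at h2
        omega
      exact hnomatch c hc.1 hcne ((checkA_iff _ _).1 hyt)
    rw [hfind]
    show ((List.range N).map (fun j : Nat => ((j : Int) + 1))).getLastD 0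
      = min_config_buttons_alt target buttons
    have hlast : ((List.range N).map (fun j : Nat => ((j : Int) + 1))).getLastD 0 = (N : Int) := by
      have hNsucc : N = (N - 1) + 1 := by omega
      rw [hNsucc, List.range_succ, List.map_append]
      simp only [List.map_cons, List.map_nil, List.getLastD_concat]
      omega
    rw [hlast, hB]
    by_cases hcan : PySem.List.sorted (PySem.Set.ofList target) (fun x => x) = target
    · rw [if_neg (not_not.2 hcan), hget target, hmi]
    · rw [if_pos hcan]
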